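-- pv_equiv track=rewrite | github.com/rutlandjoe-crypto/global-entertainment-report-web | publish_substack.py | split_title_and_body
-- ===== SOURCE A (Python) =====
-- def split_title_and_body(raw_text: str) -> tuple[str, str]:
--     """
--     Uses first non-empty line as title, remainder as body.
--     """
--     lines = raw_text.replace("\r\n", "\n").split("\n")
--
--     non_empty = [line.strip() for line in lines if line.strip()]
--     if not non_empty:
--         return "Global Sports Report", ""
--
--     title = non_empty[0]
--
--     # body starts after first matching non-empty line in original text
--     title_found = False
--     body_lines: list[str] = []
--     for line in lines:
--         stripped = line.strip()
--         if not title_found and stripped == title: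
--             title_found = True
--             continue
--         if title_found:
--             body_lines.append(line)
--
--     body = "\n".join(body_lines).strip()
--     return title, body
-- ===== SOURCE B (Python) =====
-- def split_title_and_body(raw_text: str) -> tuple[str, str]:
--     """
--     Uses first non-empty line as title, remainder as body.
--     """
--     lines = raw_text.replace("\r\n", "\n").split("\n")
--     for i, line in enumerate(lines):
--         stripped = line.strip()
--         if stripped:
--             return stripped, "\n".join(lines[i + 1:]).strip()
--     return "Global Sports Report", ""
-- ===== Notes on version B (the rewrite author's own statement) =====
-- stated objective: simpler
-- what changed: Single enumerate pass stopping at the first non-empty line and slicing lines[i+1:] for the body, replacing A's comprehension, flag variable and second value-matching scan.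
import Mathlib
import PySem

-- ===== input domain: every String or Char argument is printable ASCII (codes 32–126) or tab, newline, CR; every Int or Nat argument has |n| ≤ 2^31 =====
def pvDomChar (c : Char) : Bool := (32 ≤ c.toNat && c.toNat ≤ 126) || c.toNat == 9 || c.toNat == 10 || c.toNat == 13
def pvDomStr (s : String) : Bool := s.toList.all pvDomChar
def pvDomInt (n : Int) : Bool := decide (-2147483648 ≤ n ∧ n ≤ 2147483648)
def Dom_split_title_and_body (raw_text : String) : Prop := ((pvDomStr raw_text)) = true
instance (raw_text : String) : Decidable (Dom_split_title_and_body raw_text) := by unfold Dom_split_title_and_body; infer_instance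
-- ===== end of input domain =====

-- B replaces A's three passes (comprehension, flag loop, value re-matching) by one pass
-- that stops at the first non-empty line and slices the remainder: simpler decomposition.


-- ===== PORT A =====
-- A's loop body: 'if not title_found and stripped == title: set flag, continue; if title_found: append'
def pvStepA (title : List Char) (st : Bool × List (List Char)) (line : List Char) :
    Bool × List (List Char) :=
  let stripped := PySem.Chars.strip line
  if !st.1 && stripped == title then (true, st.2)
  else if st.1 then (true, st.2 ++ [line])
  else st

def split_title_and_body (raw_text : String) : String × String :=
  let lines := PySem.Chars.splitOn
    (PySem.Chars.replace raw_text.toList "\r\n".toList "\n".toList) "\n".toList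
  let nonEmpty := (lines.filter (fun l => (PySem.Chars.strip l).isEmpty = false)).map
    PySem.Chars.strip
  match nonEmpty with
  | [] => ("Global Sports Report", "")
  | title :: _ =>
    let r := lines.foldl (pvStepA title) (false, [])
    (String.ofList title, String.ofList (PySem.Chars.strip (PySem.Chars.join "\n".toList r.2)))

-- ===== PORT B =====
-- B's 'for i, line in enumerate(lines)': structural recursion; 'lines[i+1:]' is the rest list
def pvFindB : List (List Char) → Option (List Char × List Char)
  | [] => none
  | l :: rest =>
    let stripped := PySem.Chars.strip l
    if stripped.isEmpty then pvFindB rest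
    else some (stripped, PySem.Chars.strip (PySem.Chars.join "\n".toList rest))

def split_title_and_body_alt (raw_text : String) : String × String :=
  let lines := PySem.Chars.splitOn
    (PySem.Chars.replace raw_text.toList "\r\n".toList "\n".toList) "\n".toList
  match pvFindB lines with
  | none => ("Global Sports Report", "")
  | some (t, b) => (String.ofList t, String.ofList b)

-- ===== PRECONDITION & SPEC =====
def Spec_split_title_and_body (raw_text : String) (out : String × String) : Prop := out = split_title_and_body_alt raw_text
instance (raw_text : String) (out : String × String) : Decidable (Spec_split_title_and_body raw_text out) := by unfold Spec_split_title_and_body; infer_instance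

-- ===== CLAIM (what is proved, stated in full; the proofs are below) =====
def Claim_equal_split_title_and_body : Prop := ∀ (raw_text : String), Dom_split_title_and_body raw_text → Spec_split_title_and_body raw_text (split_title_and_body raw_text)

-- ===== LEMMAS AND PROOFS =====

-- once the flag is set, A's loop appends every remaining line
lemma foldl_stepA_true (title : List Char) (lines : List (List Char)) (acc : List (List Char)) :
    lines.foldl (pvStepA title) (true, acc) = (true, acc ++ lines) := by
  induction lines generalizing acc with
  | nil => simp
  | cons l rest ih => simp [pvStepA, ih]

-- the core equality, on an arbitrary line list
lemma core_eq (lines : List (List Char)) :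
    (match (lines.filter (fun l => (PySem.Chars.strip l).isEmpty = false)).map
        PySem.Chars.strip with
     | [] => (("Global Sports Report" : String), ("" : String))
     | title :: _ =>
       let r := lines.foldl (pvStepA title) (false, [])
       (String.ofList title, String.ofList (PySem.Chars.strip (PySem.Chars.join "\n".toList r.2)))) =
    (match pvFindB lines with
     | none => (("Global Sports Report" : String), ("" : String))
     | some (t, b) => (String.ofList t, String.ofList b)) := by
  induction lines with
  | nil => simp [pvFindB]
  | cons l rest ih =>
    by_cases h : (PySem.Chars.strip l).isEmpty = true
    · -- blank line: both sides skip it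
      have hnil : PySem.Chars.strip l = [] := List.isEmpty_iff.mp h
      have hfind : pvFindB (l :: rest) = pvFindB rest := by simp [pvFindB, hnil]
      have hfilter : (l :: rest).filter (fun l => (PySem.Chars.strip l).isEmpty = false)
          = rest.filter (fun l => (PySem.Chars.strip l).isEmpty = false) := by
        simp [hnil]
      rw [hfind, hfilter]
      rcases hne : (rest.filter (fun l => (PySem.Chars.strip l).isEmpty = false)).map
          PySem.Chars.strip with _ | ⟨title, ts⟩
      · rw [hne] at ih; simpa [hne] using ih
      · -- the title is a non-empty strip, so the blank first line does not match it
        have htitle : ¬ title.isEmpty := by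
          have hm : title ∈ (rest.filter (fun l => (PySem.Chars.strip l).isEmpty = false)).map
              PySem.Chars.strip := by rw [hne]; exact List.mem_cons_self
          obtain ⟨x, hx, hxe⟩ := List.mem_map.mp hm
          have := List.of_mem_filter hx
          simp only [decide_eq_true_eq] at this
          rw [← hxe]; simp [this]
        have hstep : pvStepA title (false, []) l = (false, []) := by
          simp only [pvStepA, hnil]
          have : ¬ (([] : List Char) == title) = true := by
            intro hc
            have := eq_of_beq hc
            simp [← this] at htitle
          simp [this]
        rw [hne] at ih
        simpa [List.foldl_cons, hstep] using ih
    · -- first non-empty line: A's second scan matches it immediately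
      simp only [Bool.not_eq_true] at h
      have hnn : PySem.Chars.strip l ≠ [] := by simp [← List.isEmpty_iff, h]
      have hfilter : (l :: rest).filter (fun l => (PySem.Chars.strip l).isEmpty = false)
          = l :: rest.filter (fun l => (PySem.Chars.strip l).isEmpty = false) := by
        simp [hnn]
      rw [hfilter]
      simp only [List.map_cons]
      have hstep : pvStepA (PySem.Chars.strip l) (false, []) l = (true, []) := by
        simp [pvStepA]
      simp [pvFindB, h, List.foldl_cons, hstep, foldl_stepA_true]

-- ===== VERDICT (by name: the statement is the Claim_ definition above) =====
theorem split_title_and_body_spec : Claim_equal_split_title_and_body := by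
  intro raw_text _
  unfold Spec_split_title_and_body split_title_and_body split_title_and_body_alt
  exact core_eq _
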